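-- pv_equiv track=rewrite | github.com/bfishbaum/euler | prob107.py | isMinimized
-- ===== SOURCE A (Python) =====
-- import copy
--
-- def connectedNetwork(network):
-- 	connected = [a == 0 for a in range(len(network))]
-- 	visited = set()
-- 	# every time a node is reached
-- 	# go to every unvisited node
-- 	# set node to True when visited
-- 	def recurse(index):
-- 		if(index not in visited):
-- 			visited.add(index)
-- 			connected[index] = True
-- 			node = network[index]
-- 			for x in range(len(node)):
-- 				if(x not in visited):
-- 					if node[x]:
-- 						recurse(x)
--
-- 	# start at first node
-- 	recurse(1)
-- 	# make sure all nodes have been visited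
-- 	return False not in connected
--
-- def isMinimized(network):
-- 	for x in range(len(network)):
-- 		for y in range(x+1,len(network[x])):
-- 			if(not network[x][y]):
-- 				temp = copy.deepcopy(network)
-- 				removeConnection(x,y,temp)
-- 				if(connectedNetwork(temp)):
-- 					return False
-- 	return True
--
-- def removeConnection(row,col,network):
-- 	network[row][col] = 0
-- 	network[col][row] = 0
-- ===== SOURCE B (Python) =====
-- def _has_gap(network):
--     return any(0 in row[x + 1:] for x, row in enumerate(network))
--
-- def _connected(network):
--     visited = set()
--     def visit(i):
--         if i not in visited:
--             visited.add(i)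
--             for j, w in enumerate(network[i]):
--                 if j not in visited and w:
--                     visit(j)
--     visit(1)
--     return all(i in visited for i in range(1, len(network)))
--
-- def isMinimized(network):
--     if not _has_gap(network):
--         return True
--     return not _connected(network)
-- ===== Notes on version B (the rewrite author's own statement) =====
-- stated objective: faster
-- what changed: A deep-copies the matrix and reruns a full DFS connectivity check for every absent upper-triangle edge; B observes that removing an already-absent undirected edge leaves the graph unchanged, so it scans once for an absent edge and runs the DFS connectivity check exactly once on the original matrix.
-- outside the precondition, e.g. on isMinimized([[1, 0, 2, 1], [2, 1], [0, 1], [1, 1, 0]]): A returns True, B returns False; on isMinimized([[1, 0, 1], [1]]): A returns False, B raises IndexError; on isMinimized([[1, 0], [1, 1]]): A returns False, B returns False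
import Mathlib
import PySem

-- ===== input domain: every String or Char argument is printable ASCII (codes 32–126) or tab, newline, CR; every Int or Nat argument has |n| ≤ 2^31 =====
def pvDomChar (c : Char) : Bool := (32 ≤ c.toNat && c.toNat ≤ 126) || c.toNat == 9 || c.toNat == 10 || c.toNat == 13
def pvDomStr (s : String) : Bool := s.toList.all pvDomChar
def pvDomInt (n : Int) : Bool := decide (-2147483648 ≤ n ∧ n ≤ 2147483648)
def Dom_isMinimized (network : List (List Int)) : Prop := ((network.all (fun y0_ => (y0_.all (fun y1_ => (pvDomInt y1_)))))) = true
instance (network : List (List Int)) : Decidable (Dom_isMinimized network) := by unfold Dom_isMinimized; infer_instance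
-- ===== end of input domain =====

-- B hoists the connectivity check out of A's pair loop: on the stated (undirected) domain, removing
-- an already-absent edge never changes the graph, so one absent-edge scan plus one DFS suffices.

-- recursion fuel for both DFS ports: a purely structural termination device, strictly larger than the
-- depth the Python recursion can reach (each nested call adds a distinct index to `visited`)
def dfsFuel (network : List (List Int)) : Nat :=
  network.length + network.foldl (fun m r => max m r.length) 0 + 2

-- ===== PORT A =====

-- network[row][col] = 0; network[col][row] = 0  (exact within Pre_; Python raises on an out-of-range index)
def removeConnection (row col : Int) (network : List (List Int)) : List (List Int) :=
  let net1 := PySem.List.pySetD network row (PySem.List.pySetD (PySem.List.pyGetD network row []) col 0)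
  PySem.List.pySetD net1 col (PySem.List.pySetD (PySem.List.pyGetD net1 col []) row 0)

-- the inner `recurse` of connectedNetwork (state: visited set, connected list)
def cnRecurse (network : List (List Int)) : Nat → Int → PySem.Set Int × List Bool → PySem.Set Int × List Bool
  | 0, _, st => st
  | fuel+1, index, st =>
    if st.1.contains index then st
    else
      let visited := st.1.add index
      let connected := PySem.List.pySetD st.2 index true
      let node := PySem.List.pyGetD network index []
      (PySem.List.pyRange 0 (PySem.List.len node)).foldl
        (fun st2 x =>
          if st2.1.contains x then st2
          else if PySem.List.pyGetD node x 0 ≠ 0 then cnRecurse network fuel x st2 else st2)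
        (visited, connected)

def connectedNetwork (network : List (List Int)) : Bool :=
  let connected := (PySem.List.pyRange 0 (PySem.List.len network)).map (fun a => a == 0)
  let st := cnRecurse network (dfsFuel network) 1 (PySem.Set.empty, connected)
  !(st.2.contains false)

-- inner loop `for y in range(x+1, len(network[x]))` with the early `return False`
def isMinimizedInner (network : List (List Int)) (x : Int) : List Int → Bool
  | [] => false
  | y :: ys =>
    if PySem.List.pyGetD (PySem.List.pyGetD network x []) y 0 = 0 then
      -- copy.deepcopy of a pure value followed by mutation is a functional update
      let temp := removeConnection x y network
      if connectedNetwork temp then true else isMinimizedInner network x ys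
    else isMinimizedInner network x ys

def isMinimizedOuter (network : List (List Int)) : List Int → Bool
  | [] => false
  | x :: xs =>
    if isMinimizedInner network x
        (PySem.List.pyRange (x+1) (PySem.List.len (PySem.List.pyGetD network x []))) then true
    else isMinimizedOuter network xs

def isMinimized (network : List (List Int)) : Bool :=
  !(isMinimizedOuter network (PySem.List.pyRange 0 (PySem.List.len network)))

-- ===== PORT B =====

-- any(0 in row[x+1:] for x, row in enumerate(network))
def altHasGap (network : List (List Int)) : Bool :=
  (PySem.List.enumerate network).any (fun p => (PySem.List.slice p.2 (some (p.1 + 1)) none).contains 0)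

-- the inner `visit` of _connected (state: visited set only)
def altVisit (network : List (List Int)) : Nat → Int → PySem.Set Int → PySem.Set Int
  | 0, _, visited => visited
  | fuel+1, i, visited =>
    if visited.contains i then visited
    else
      (PySem.List.enumerate (PySem.List.pyGetD network i [])).foldl
        (fun v p => if !v.contains p.1 && p.2 != 0 then altVisit network fuel p.1 v else v)
        (visited.add i)

def altConnected (network : List (List Int)) : Bool :=
  let visited := altVisit network (dfsFuel network) 1 PySem.Set.empty
  (PySem.List.pyRange 1 (PySem.List.len network)).all (fun i => visited.contains i)

def isMinimized_alt (network : List (List Int)) : Bool :=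
  if !altHasGap network then true else !altConnected network

-- ===== PRECONDITION & SPEC =====
-- Pre_ restricts to the natural domain of the task (an undirected adjacency matrix): either the
-- upper triangle has no absent edge (A's loop body never runs), or the matrix is square and every
-- absent upper-triangle edge is also absent in the transpose position.  Outside it A either raises
-- IndexError on ragged rows or tests a genuinely modified directed graph.
def Pre_isMinimized (network : List (List Int)) : Prop :=
  (∀ x < network.length, ∀ y < (network.getD x []).length, x < y →
      (network.getD x []).getD y 0 ≠ 0)
  ∨ ((∀ row ∈ network, row.length = network.length) ∧
     (∀ x < network.length, ∀ y < network.length, x < y →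
        (network.getD x []).getD y 0 = 0 → (network.getD y []).getD x 0 = 0))
instance (network : List (List Int)) : Decidable (Pre_isMinimized network) := by
  unfold Pre_isMinimized; infer_instance

def pvWitness_isMinimized : List (List Int) := [[1, 0], [0, 1]]

def Spec_isMinimized (network : List (List Int)) (out : Bool) : Prop := out = isMinimized_alt network
instance (network : List (List Int)) (out : Bool) : Decidable (Spec_isMinimized network out) := by
  unfold Spec_isMinimized; infer_instance

-- ===== CLAIM (what is proved, stated in full; the proofs are below) =====
def Claim_equal_isMinimized : Prop := ∀ (network : List (List Int)), Dom_isMinimized network → Pre_isMinimized network → Spec_isMinimized network (isMinimized network)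

-- ===== LEMMAS AND PROOFS =====

theorem pySetD_nonneg {α : Type} (xs : List α) {i : Int} (v : α) (h : 0 ≤ i) :
    PySem.List.pySetD xs i v = xs.set i.toNat v := by
  unfold PySem.List.pySetD PySem.List.pySet? PySem.List.pyIdx?
  split_ifs <;> simp_all
  exact (List.set_eq_of_length_le (by omega)).symm

-- the `connected` list mirrors the visited set: entry k is true iff k = 0 or k has been visited
def InvC (n : Nat) (V : PySem.Set Int) (C : List Bool) : Prop :=
  C.length = n ∧ ∀ k : Nat, k < n → C.getD k false = (decide (k = 0) || V.contains (k : Int))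

theorem invC_add (n : Nat) (V : PySem.Set Int) (C : List Bool) {i : Int} (hi : 0 ≤ i)
    (h : InvC n V C) : InvC n (V.add i) (PySem.List.pySetD C i true) := by
  obtain ⟨hlen, hC⟩ := h
  rw [pySetD_nonneg C true hi]
  refine ⟨by simpa using hlen, ?_⟩
  intro k hk
  by_cases hk_i : (k : Int) = i
  · have : i.toNat = k := by omega
    subst this
    rw [List.getD_eq_getElem _ _ (by simpa [hlen] using hk)]
    simp [PySem.Set.mem_add, hk_i]
  · have hne : i.toNat ≠ k := by omega
    have : (C.set i.toNat true).getD k false = C.getD k false := by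
      by_cases hklen : k < C.length
      · rw [List.getD_eq_getElem _ _ (by simpa using hklen),
            List.getD_eq_getElem _ _ hklen, List.getElem_set_ne hne]
      · rw [List.getD_eq_default _ _ (by simpa using Nat.le_of_not_lt hklen),
            List.getD_eq_default _ _ (Nat.le_of_not_lt hklen)]
    rw [this, hC k hk]
    have : (V.add i).contains (k : Int) = V.contains (k : Int) := by
      by_cases hm : (k : Int) ∈ V
      · simp [PySem.Set.mem_add, hm]
      · simp [PySem.Set.mem_add, hm, hk_i]
    rw [this]

-- simulation: A's recursion and B's recursion visit the same set, and A's `connected`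
-- list keeps mirroring the visited set
theorem cn_sim (net : List (List Int)) : ∀ (fuel : Nat) (i : Int) (V : PySem.Set Int) (C : List Bool),
    0 ≤ i → InvC net.length V C →
    (cnRecurse net fuel i (V, C)).1 = altVisit net fuel i V ∧
    InvC net.length (cnRecurse net fuel i (V, C)).1 (cnRecurse net fuel i (V, C)).2 := by
  intro fuel
  induction fuel with
  | zero => intro i V C _ h; exact ⟨rfl, h⟩
  | succ fuel ih =>
    intro i V C hi h
    rw [cnRecurse, altVisit]
    by_cases hc : V.contains i = true
    · rw [if_pos hc, if_pos hc]
      exact ⟨rfl, h⟩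
    · rw [if_neg hc, if_neg hc]
      set node := PySem.List.pyGetD net i [] with hnode
      rw [PySem.List.enumerate_eq_map_pyRange node 0, List.foldl_map]
      have hstart := invC_add net.length V C hi h
      have hfold : ∀ (l : List Int), (∀ x ∈ l, 0 ≤ x) →
          ∀ (V' : PySem.Set Int) (C' : List Bool), InvC net.length V' C' →
          (l.foldl (fun st2 x =>
              if st2.1.contains x then st2
              else if PySem.List.pyGetD node x 0 ≠ 0 then cnRecurse net fuel x st2 else st2)
            (V', C')).1 =
            l.foldl (fun v j =>
              if !v.contains j && PySem.List.pyGetD node j 0 != 0 then altVisit net fuel j v else v) V' ∧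
          InvC net.length
            (l.foldl (fun st2 x =>
              if st2.1.contains x then st2
              else if PySem.List.pyGetD node x 0 ≠ 0 then cnRecurse net fuel x st2 else st2)
              (V', C')).1
            (l.foldl (fun st2 x =>
              if st2.1.contains x then st2
              else if PySem.List.pyGetD node x 0 ≠ 0 then cnRecurse net fuel x st2 else st2)
              (V', C')).2 := by
        intro l
        induction l with
        | nil => intro _ V' C' h'; exact ⟨rfl, h'⟩
        | cons x xs ihl =>
          intro hnn V' C' h'
          have hx : 0 ≤ x := hnn x (List.mem_cons_self)
          simp only [List.foldl_cons]
          by_cases hcx : V'.contains x = true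
          · rw [if_pos hcx, if_neg (by rw [hcx]; simp)]
            exact ihl (fun y hy => hnn y (List.mem_cons_of_mem _ hy)) V' C' h'
          · have hcx' : V'.contains x = false := eq_false_of_ne_true hcx
            rw [if_neg hcx]
            by_cases hval : PySem.List.pyGetD node x 0 = 0
            · rw [if_neg (by simp [hval]), if_neg (by rw [hval]; simp)]
              exact ihl (fun y hy => hnn y (List.mem_cons_of_mem _ hy)) V' C' h'
            · rw [if_pos hval, if_pos (by rw [hcx']; simp [bne_iff_ne, hval])]
              obtain ⟨hfst, hinv⟩ := ih x V' C' hx h'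
              rw [← hfst]
              have := ihl (fun y hy => hnn y (List.mem_cons_of_mem _ hy))
                (cnRecurse net fuel x (V', C')).1 (cnRecurse net fuel x (V', C')).2 hinv
              simpa using this
      exact hfold _ (fun x hx => (PySem.List.mem_pyRange_one.1 hx).1) _ _ hstart

-- `any` congruence over members (membership-aware variant used by the bridges below)
theorem anyCongrMem {α : Type} (l : List α) (f g : α → Bool) (h : ∀ x ∈ l, f x = g x) :
    l.any f = l.any g := by
  induction l with
  | nil => rfl
  | cons a as ih =>
    simp only [List.any_cons, h a List.mem_cons_self,
      ih (fun x hx => h x (List.mem_cons_of_mem _ hx))]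

-- the final checks agree: `False not in connected` vs `all(i in visited for i in range(1, n))`
theorem check_eq (n : Nat) (V : PySem.Set Int) (C : List Bool) (h : InvC n V C) :
    (!(C.contains false)) = (PySem.List.pyRange 1 (n : Int)).all (fun i => V.contains i) := by
  obtain ⟨hlen, hC⟩ := h
  rw [Bool.eq_iff_iff]
  constructor
  · intro hA
    rw [List.all_eq_true]
    intro i hi
    obtain ⟨hi1, hi2⟩ := PySem.List.mem_pyRange_one.1 hi
    have hi2' : i.toNat < n := by omega
    have hinv := hC i.toNat hi2'
    have hfa : false ∉ C := by
      intro hmem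
      rw [Bool.not_eq_true'] at hA
      rw [List.contains_eq_mem] at hA
      exact (decide_eq_false_iff_not.1 hA) hmem
    have hklen : i.toNat < C.length := by omega
    have helem : C.getD i.toNat false = true := by
      rw [List.getD_eq_getElem _ _ hklen]
      by_contra hne
      have h2 : C[i.toNat] = false := Bool.eq_false_iff.2 hne
      exact hfa (List.mem_iff_getElem.2 ⟨i.toNat, hklen, h2⟩)
    rw [helem] at hinv
    have hcont : V.contains (i.toNat : Int) = true := by
      rcases Bool.or_eq_true_iff.1 hinv.symm with h0 | hv
      · exfalso
        have := of_decide_eq_true h0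
        omega
      · exact hv
    have hcast : ((i.toNat : Int)) = i := Int.toNat_of_nonneg (by omega)
    rw [hcast] at hcont
    exact hcont
  · intro hB
    rw [Bool.not_eq_true']
    rw [List.contains_eq_mem]
    rw [decide_eq_false_iff_not]
    intro hmem
    obtain ⟨k, hk, hkval⟩ := List.mem_iff_getElem.1 hmem
    have hkn : k < n := by omega
    have hinv := hC k hkn
    rw [List.getD_eq_getElem _ _ hk, hkval] at hinv
    have hk0 : k ≠ 0 := by
      intro h0
      subst h0
      rw [decide_eq_true rfl, Bool.true_or] at hinv
      exact Bool.false_ne_true hinv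
    have hcont : V.contains (k : Int) = false := by
      rw [decide_eq_false hk0, Bool.false_or] at hinv
      exact hinv.symm
    have hall := List.all_eq_true.1 hB (k : Int)
      (PySem.List.mem_pyRange_one.2 ⟨by omega, by omega⟩)
    exact Bool.false_ne_true (hcont.symm.trans hall)

-- A's connectivity check equals B's
theorem conn_eq (net : List (List Int)) : connectedNetwork net = altConnected net := by
  have hC0 : InvC net.length PySem.Set.empty
      ((PySem.List.pyRange 0 (PySem.List.len net)).map (fun a => a == 0)) := by
    constructor
    · rw [List.length_map, PySem.List.length_pyRange_one, PySem.List.len_eq]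
      omega
    · intro k hk
      have hk' : k < ((PySem.List.pyRange 0 (PySem.List.len net)).map
          (fun a : Int => a == 0)).length := by
        rw [List.length_map, PySem.List.length_pyRange_one, PySem.List.len_eq]
        omega
      rw [List.getD_eq_getElem _ _ hk']
      simp only [List.getElem_map, PySem.List.getElem_pyRange_one]
      have hemp : PySem.Set.contains (PySem.Set.empty : PySem.Set Int) (k : Int) = false := by
        rw [PySem.Set.contains_eq_listContains]
        rfl
      rw [hemp, Bool.or_false]
      apply Bool.eq_iff_iff.2
      simp [beq_iff_eq, Int.natCast_eq_zero]
  obtain ⟨hfst, hinv⟩ := cn_sim net (dfsFuel net) 1 PySem.Set.empty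
    ((PySem.List.pyRange 0 (PySem.List.len net)).map (fun a => a == 0)) (by omega) hC0
  unfold connectedNetwork altConnected
  rw [← hfst, PySem.List.len_eq net]
  exact check_eq net.length _ _ hinv

-- the outer loop is an `any` over its index list
theorem aOuter_eq_any (net : List (List Int)) : ∀ l : List Int,
    isMinimizedOuter net l = l.any (fun x => isMinimizedInner net x
      (PySem.List.pyRange (x+1) (PySem.List.len (PySem.List.pyGetD net x [])))) := by
  intro l
  induction l with
  | nil => rfl
  | cons x xs ih =>
    rw [isMinimizedOuter, List.any_cons, ih]
    by_cases h : isMinimizedInner net x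
        (PySem.List.pyRange (x+1) (PySem.List.len (PySem.List.pyGetD net x []))) = true
    · rw [if_pos h, h, Bool.true_or]
    · rw [if_neg h, eq_false_of_ne_true h, Bool.false_or]

-- removing an absent symmetric edge leaves the matrix unchanged
theorem removeConnection_self (net : List (List Int)) (x y : Int)
    (hx0 : 0 ≤ x) (hy0 : 0 ≤ y)
    (hxr : x.toNat < net.length) (hyr : y.toNat < net.length)
    (hylen : y.toNat < (net.getD x.toNat []).length)
    (hxlen : x.toNat < (net.getD y.toNat []).length)
    (hxy : (net.getD x.toNat []).getD y.toNat 0 = 0)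
    (hyx : (net.getD y.toNat []).getD x.toNat 0 = 0) :
    removeConnection x y net = net := by
  unfold removeConnection
  have hrowx : PySem.List.pyGetD net x [] = net.getD x.toNat [] :=
    PySem.List.pyGetD_of_nonneg net [] hx0
  have h1 : PySem.List.pySetD (PySem.List.pyGetD net x []) y 0 = net.getD x.toNat [] := by
    rw [hrowx, pySetD_nonneg _ _ hy0]
    have : (net.getD x.toNat [])[y.toNat] = (0 : Int) := by
      rw [← List.getD_eq_getElem _ 0 hylen]; exact hxy
    rw [← this]; exact List.set_getElem_self hylen
  rw [h1, pySetD_nonneg _ _ hx0]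
  have hgx : net.getD x.toNat [] = net[x.toNat] := List.getD_eq_getElem net [] hxr
  have h2 : net.set x.toNat (net.getD x.toNat []) = net := by
    rw [hgx]; exact List.set_getElem_self hxr
  rw [h2]
  show PySem.List.pySetD net y (PySem.List.pySetD (PySem.List.pyGetD net y []) x 0) = net
  have hrowy : PySem.List.pyGetD net y [] = net.getD y.toNat [] :=
    PySem.List.pyGetD_of_nonneg net [] hy0
  have h3 : PySem.List.pySetD (PySem.List.pyGetD net y []) x 0 = net.getD y.toNat [] := by
    rw [hrowy, pySetD_nonneg _ _ hx0]
    have : (net.getD y.toNat [])[x.toNat] = (0 : Int) := by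
      rw [← List.getD_eq_getElem _ 0 hxlen]; exact hyx
    rw [← this]; exact List.set_getElem_self hxlen
  rw [h3, pySetD_nonneg _ _ hy0]
  have hgy : net.getD y.toNat [] = net[y.toNat] := List.getD_eq_getElem net [] hyr
  rw [hgy]; exact List.set_getElem_self hyr

-- under Square + ZeroSym the inner loop factors as (gap in this row) && connectedNetwork net
theorem aInner_const (net : List (List Int))
    (hsq : ∀ row ∈ net, row.length = net.length)
    (hsym : ∀ x < net.length, ∀ y < net.length, x < y →
      (net.getD x []).getD y 0 = 0 → (net.getD y []).getD x 0 = 0)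
    (x : Int) (hx0 : 0 ≤ x) (hxn : x.toNat < net.length) :
    ∀ l : List Int, (∀ y ∈ l, x < y ∧ y < PySem.List.len (PySem.List.pyGetD net x [])) →
    isMinimizedInner net x l =
      ((l.any fun y => decide (PySem.List.pyGetD (PySem.List.pyGetD net x []) y 0 = 0)) &&
        connectedNetwork net) := by
  intro l
  induction l with
  | nil => intro _; rfl
  | cons y ys ih =>
    intro hb
    obtain ⟨hxy, hylen⟩ := hb y (List.mem_cons_self)
    have hy0 : 0 ≤ y := le_of_lt (lt_of_le_of_lt hx0 hxy)
    have hrowx : PySem.List.pyGetD net x [] = net.getD x.toNat [] :=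
      PySem.List.pyGetD_of_nonneg net [] hx0
    have hrowlen : (net.getD x.toNat []).length = net.length := by
      apply hsq
      rw [List.getD_eq_getElem net [] hxn]
      exact List.getElem_mem hxn
    have hylen' : y.toNat < (net.getD x.toNat []).length := by
      rw [hrowx, PySem.List.len_eq] at hylen
      omega
    have hyn : y.toNat < net.length := by omega
    rw [isMinimizedInner, List.any_cons]
    by_cases hgap : PySem.List.pyGetD (PySem.List.pyGetD net x []) y 0 = 0
    · rw [if_pos hgap]
      have hgap' : (net.getD x.toNat []).getD y.toNat 0 = 0 := by
        rw [hrowx, PySem.List.pyGetD_of_nonneg _ _ hy0] at hgap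
        exact hgap
      have hxylen : x.toNat < (net.getD y.toNat []).length := by
        have : (net.getD y.toNat []).length = net.length := by
          apply hsq
          rw [List.getD_eq_getElem net [] hyn]
          exact List.getElem_mem hyn
        omega
      have hsymv : (net.getD y.toNat []).getD x.toNat 0 = 0 :=
        hsym x.toNat hxn y.toNat hyn (by omega) hgap'
      rw [removeConnection_self net x y hx0 hy0 hxn hyn hylen' hxylen hgap' hsymv]
      simp only [hgap, decide_true, Bool.true_or, Bool.true_and]
      by_cases hc : connectedNetwork net <;>
        simp [hc, ih (fun z hz => hb z (List.mem_cons_of_mem _ hz))]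
    · rw [if_neg hgap, ih (fun z hz => hb z (List.mem_cons_of_mem _ hz))]
      simp [hgap]

-- a gap-free inner index list makes the inner loop return false
theorem aInner_false (net : List (List Int)) (x : Int) :
    ∀ l : List Int, (∀ y ∈ l, PySem.List.pyGetD (PySem.List.pyGetD net x []) y 0 ≠ 0) →
    isMinimizedInner net x l = false := by
  intro l
  induction l with
  | nil => intro _; rfl
  | cons y ys ih =>
    intro hb
    rw [isMinimizedInner, if_neg (hb y (List.mem_cons_self))]
    exact ih (fun z hz => hb z (List.mem_cons_of_mem _ hz))

-- per-row bridge: A's indexed gap scan over range(a, len(row)) is B's `0 in row[a:]`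
theorem gap_row_eq (row : List Int) (a : Int) (ha : 0 ≤ a) :
    ((PySem.List.pyRange a (PySem.List.len row)).any fun y =>
      decide (PySem.List.pyGetD row y 0 = 0)) = (row.drop a.toNat).contains 0 := by
  rw [← PySem.List.map_pyGetD_pyRange row 0 ha, List.contains_eq_any_beq, List.any_map]
  apply anyCongrMem
  intro y _
  simp only [Function.comp]
  by_cases h : PySem.List.pyGetD row y 0 = 0
  · rw [h, decide_eq_true rfl]
    rfl
  · rw [decide_eq_false h]
    exact (beq_eq_false_iff_ne.2 (fun e => h e.symm)).symm

-- B's gap scan as an `any` over the same index range A's outer loop uses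
theorem altHasGap_eq (net : List (List Int)) :
    altHasGap net = (PySem.List.pyRange 0 (PySem.List.len net)).any
      (fun x => ((PySem.List.pyGetD net x []).drop (x+1).toNat).contains 0) := by
  unfold altHasGap
  rw [PySem.List.enumerate_eq_map_pyRange net [], List.any_map]
  apply anyCongrMem
  intro x hx
  have hx0 : 0 ≤ x := (PySem.List.mem_pyRange_one.1 hx).1
  simp only [Function.comp]
  rw [PySem.List.slice_from _ (by omega : (0:Int) ≤ x + 1)]

-- A's whole pair scan factors as altHasGap && connectedNetwork (Square + ZeroSym case)
theorem aOuter_factor (net : List (List Int))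
    (hsq : ∀ row ∈ net, row.length = net.length)
    (hsym : ∀ x < net.length, ∀ y < net.length, x < y →
      (net.getD x []).getD y 0 = 0 → (net.getD y []).getD x 0 = 0) :
    isMinimizedOuter net (PySem.List.pyRange 0 (PySem.List.len net)) =
      (altHasGap net && connectedNetwork net) := by
  rw [aOuter_eq_any, altHasGap_eq]
  have hstep : ∀ x ∈ PySem.List.pyRange 0 (PySem.List.len net),
      isMinimizedInner net x
        (PySem.List.pyRange (x+1) (PySem.List.len (PySem.List.pyGetD net x []))) =
      (((PySem.List.pyGetD net x []).drop (x+1).toNat).contains 0 && connectedNetwork net) := by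
    intro x hx
    obtain ⟨hx0, hxlt⟩ := PySem.List.mem_pyRange_one.1 hx
    have hxn : x.toNat < net.length := by rw [PySem.List.len_eq] at hxlt; omega
    rw [aInner_const net hsq hsym x hx0 hxn _
      (fun y hy => ⟨by have := (PySem.List.mem_pyRange_one.1 hy).1; omega,
                    (PySem.List.mem_pyRange_one.1 hy).2⟩)]
    rw [gap_row_eq _ _ (by omega : (0:Int) ≤ x + 1)]
  rw [anyCongrMem _ _ _ hstep]
  by_cases hc : connectedNetwork net <;> simp [hc]

-- ===== VERDICT (by name: the statement is the Claim_ definition above) =====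
theorem isMinimized_spec : Claim_equal_isMinimized := by
  intro network _ hpre
  unfold Spec_isMinimized isMinimized isMinimized_alt
  rcases hpre with hnog | ⟨hsq, hsym⟩
  · -- no absent upper-triangle edge: A's loop body never fires, B's scan finds nothing
    have hAllNe : ∀ x ∈ PySem.List.pyRange 0 (PySem.List.len network),
        ∀ y ∈ PySem.List.pyRange (x+1) (PySem.List.len (PySem.List.pyGetD network x [])),
        PySem.List.pyGetD (PySem.List.pyGetD network x []) y 0 ≠ 0 := by
      intro x hx y hy
      obtain ⟨hx0, hxlt⟩ := PySem.List.mem_pyRange_one.1 hx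
      obtain ⟨hy1, hylt⟩ := PySem.List.mem_pyRange_one.1 hy
      have hy0 : 0 ≤ y := by omega
      rw [PySem.List.pyGetD_of_nonneg _ _ hx0] at hy hylt ⊢
      rw [PySem.List.pyGetD_of_nonneg _ _ hy0]
      have hxn : x.toNat < network.length := by rw [PySem.List.len_eq] at hxlt; omega
      have hyn : y.toNat < (network.getD x.toNat []).length := by
        rw [PySem.List.len_eq] at hylt; omega
      exact hnog x.toNat hxn y.toNat hyn (by omega)
    have hA : isMinimizedOuter network (PySem.List.pyRange 0 (PySem.List.len network)) = false := by
      rw [aOuter_eq_any, List.any_eq_false]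
      intro x hx
      rw [Bool.not_eq_true]
      exact aInner_false network x _ (hAllNe x hx)
    have hB : altHasGap network = false := by
      rw [altHasGap_eq, List.any_eq_false]
      intro x hx
      have hx0 : 0 ≤ x := (PySem.List.mem_pyRange_one.1 hx).1
      rw [Bool.not_eq_true, ← gap_row_eq _ _ (by omega : (0:Int) ≤ x + 1),
        List.any_eq_false]
      intro y hy
      rw [Bool.not_eq_true]
      exact decide_eq_false (hAllNe x hx y hy)
    rw [hA, hB]
    rfl
  · -- square + symmetric-absence: every tested temp equals the network itself
    rw [aOuter_factor network hsq hsym, conn_eq]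
    by_cases hg : altHasGap network <;> by_cases hc : altConnected network <;> simp [hg, hc]
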